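-- pv_equiv track=rewrite | github.com/pypi-data/pypi-mirror-359 | packages/banger/banger-1.1.0.tar.gz/banger-1.1.0/src/banger/fonts/ttf.py | _clip_bitmap_to_content
-- ===== SOURCE A (Python) =====
-- from typing import Dict, Optional, Tuple, Any, Set
--
-- def _clip_bitmap_to_content(
--     bitmap_2d: list, width: int, height: int
-- ) -> Tuple[list, int]:
--     """Clip bitmap to actual content bounding box on X-axis only.
--
--     This makes all fonts effectively proportional by removing empty space
--     on the left and right sides of each character.
--
--     Args:
--         bitmap_2d: 2D list of booleans representing pixels
--         width: Original bitmap width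
--         height: Original bitmap height
--
--     Returns:
--         Tuple of (clipped_bitmap_2d, clipped_width)
--     """
--     if not bitmap_2d or width == 0 or height == 0:
--         return bitmap_2d, width
--
--     # Find leftmost and rightmost columns with any set pixels
--     left_bound = width
--     right_bound = -1
--
--     for y in range(height):
--         for x in range(width):
--             if bitmap_2d[y][x]:  # Pixel is set
--                 left_bound = min(left_bound, x)
--                 right_bound = max(right_bound, x)
--
--     # If no pixels found, return minimal bitmap
--     if right_bound == -1:
--         # Return single column of empty pixels for space characters
--         clipped_bitmap = []
--         for y in range(height):
--             clipped_bitmap.append([False])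
--         return clipped_bitmap, 1
--
--     # Clip the bitmap to the content bounds (X-axis only)
--     clipped_width = right_bound - left_bound + 1
--     clipped_bitmap = []
--
--     for y in range(height):
--         clipped_row = []
--         for x in range(left_bound, right_bound + 1):
--             clipped_row.append(bitmap_2d[y][x])
--         clipped_bitmap.append(clipped_row)
--
--     return clipped_bitmap, clipped_width
-- ===== SOURCE B (Python) =====
-- from typing import Tuple
--
--
-- def _clip_bitmap_to_content(
--     bitmap_2d: list, width: int, height: int
-- ) -> Tuple[list, int]:
--     """Clip bitmap to content bounding box on the X-axis (column-scan version)."""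
--     if not bitmap_2d or width == 0 or height == 0:
--         return bitmap_2d, width
--
--     rows = bitmap_2d[:height] if height > 0 else []
--     if not rows:
--         return [], 1
--
--     def column_set(x: int) -> bool:
--         return any(row[x] for row in rows)
--
--     left = next((x for x in range(width) if column_set(x)), None)
--     if left is None:
--         # No content: single empty column per row (space character)
--         return [[False] for _ in range(height)], 1
--
--     right = next(x for x in range(width - 1, -1, -1) if column_set(x))
--     return [row[left:right + 1] for row in rows], right - left + 1
-- ===== Notes on version B (the rewrite author's own statement) =====
-- stated objective: alternative
-- what changed: Replaces A's single nested y/x scan that folds min/max bounds over every pixel with two early-exit column scans (find the first and the last column containing a set pixel) followed by per-row slicing.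
import Mathlib
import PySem

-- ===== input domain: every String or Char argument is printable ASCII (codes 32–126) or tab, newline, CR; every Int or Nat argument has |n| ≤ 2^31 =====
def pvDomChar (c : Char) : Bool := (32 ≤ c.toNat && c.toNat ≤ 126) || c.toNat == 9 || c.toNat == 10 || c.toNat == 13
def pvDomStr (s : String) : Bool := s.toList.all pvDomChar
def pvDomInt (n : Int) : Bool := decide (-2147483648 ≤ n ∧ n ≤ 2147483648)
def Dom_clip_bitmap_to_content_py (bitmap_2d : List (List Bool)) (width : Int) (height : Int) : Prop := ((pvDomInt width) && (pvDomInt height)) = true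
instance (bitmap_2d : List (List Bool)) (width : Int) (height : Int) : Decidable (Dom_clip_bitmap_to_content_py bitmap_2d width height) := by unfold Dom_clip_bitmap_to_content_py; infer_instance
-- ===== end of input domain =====

-- B replaces A's nested min/max pixel scan by two early-exit column scans plus per-row slicing (alternative decomposition, same cost).


-- ===== PORT A =====
def clip_bitmap_to_content_py (bitmap_2d : List (List Bool)) (width : Int) (height : Int) : List (List Bool) × Int :=
  if bitmap_2d = [] ∨ width = 0 ∨ height = 0 then (bitmap_2d, width)
  else
    -- for y in range(height): for x in range(width): if bitmap_2d[y][x]: update bounds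
    let bounds : Int × Int :=
      (PySem.List.pyRange 0 height 1).foldl (fun (lr : Int × Int) y =>
        (PySem.List.pyRange 0 width 1).foldl (fun (lr : Int × Int) x =>
          if PySem.List.pyGetD (PySem.List.pyGetD bitmap_2d y []) x false then
            (min lr.1 x, max lr.2 x)
          else lr) lr) (width, -1)
    if bounds.2 = -1 then
      ((PySem.List.pyRange 0 height 1).foldl (fun acc (_ : Int) => acc ++ [[false]]) [], 1)
    else
      ((PySem.List.pyRange 0 height 1).foldl (fun acc y =>
        acc ++ [(PySem.List.pyRange bounds.1 (bounds.2 + 1) 1).foldl (fun row x =>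
                  row ++ [PySem.List.pyGetD (PySem.List.pyGetD bitmap_2d y []) x false]) []]) [],
       bounds.2 - bounds.1 + 1)

-- ===== PORT B =====
-- column_set(x) = any(row[x] for row in rows)
def pvColumnSet (rows : List (List Bool)) (x : Int) : Bool :=
  rows.any (fun row => PySem.List.pyGetD row x false)

def clip_bitmap_to_content_py_alt (bitmap_2d : List (List Bool)) (width : Int) (height : Int) : List (List Bool) × Int :=
  if bitmap_2d = [] ∨ width = 0 ∨ height = 0 then (bitmap_2d, width)
  else
    let rows := if height > 0 then PySem.List.slice bitmap_2d none (some height) else []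
    if rows = [] then ([], 1)
    else match (PySem.List.pyRange 0 width 1).find? (pvColumnSet rows) with
    | none => ((PySem.List.pyRange 0 height 1).map (fun _ => [false]), 1)
    | some left =>
      match (PySem.List.pyRange (width - 1) (-1) (-1)).find? (pvColumnSet rows) with
      | none => (rows, width)  -- unreachable (a set column exists); guard only makes the match total
      | some right =>
        (rows.map (fun row => PySem.List.slice row (some left) (some (right + 1))),
         right - left + 1)

-- ===== PRECONDITION & SPEC =====
-- Pre_ excludes exactly the inputs on which A raises IndexError: height exceeding the number of rows,
-- or a row among the first `height` rows shorter than `width` (with width > 0, height > 0, bitmap nonempty).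
def Pre_clip_bitmap_to_content_py (bitmap_2d : List (List Bool)) (width : Int) (height : Int) : Prop :=
  width ≤ 0 ∨ height ≤ 0 ∨ bitmap_2d = [] ∨
    (height ≤ (bitmap_2d.length : Int) ∧ ∀ row ∈ bitmap_2d.take height.toNat, width ≤ (row.length : Int))
instance (bitmap_2d : List (List Bool)) (width : Int) (height : Int) : Decidable (Pre_clip_bitmap_to_content_py bitmap_2d width height) := by unfold Pre_clip_bitmap_to_content_py; infer_instance

def pvWitness_clip_bitmap_to_content_py : List (List Bool) × Int × Int :=
  ([[false, true, false], [false, false, true]], 3, 2)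

def Spec_clip_bitmap_to_content_py (bitmap_2d : List (List Bool)) (width : Int) (height : Int) (out : List (List Bool) × Int) : Prop := out = clip_bitmap_to_content_py_alt bitmap_2d width height
instance (bitmap_2d : List (List Bool)) (width : Int) (height : Int) (out : List (List Bool) × Int) : Decidable (Spec_clip_bitmap_to_content_py bitmap_2d width height out) := by unfold Spec_clip_bitmap_to_content_py; infer_instance

-- ===== CLAIM (what is proved, stated in full; the proofs are below) =====
def Claim_equal_clip_bitmap_to_content_py : Prop := ∀ (bitmap_2d : List (List Bool)) (width : Int) (height : Int), Dom_clip_bitmap_to_content_py bitmap_2d width height → Pre_clip_bitmap_to_content_py bitmap_2d width height → Spec_clip_bitmap_to_content_py bitmap_2d width height (clip_bitmap_to_content_py bitmap_2d width height)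

-- ===== LEMMAS AND PROOFS =====
-- hits rows cols : every column index with a set pixel, listed row by row
def pvHits (rows : List (List Bool)) (cols : List Int) : List Int :=
  rows.flatMap (fun row => cols.filter (fun x => PySem.List.pyGetD row x false))

lemma pvBounds_eq (rows : List (List Bool)) (cols : List Int) (a b : Int) :
    rows.foldl (fun (lr : Int × Int) row =>
        cols.foldl (fun (lr : Int × Int) x =>
          if PySem.List.pyGetD row x false then (min lr.1 x, max lr.2 x) else lr) lr) (a, b)
      = ((pvHits rows cols).foldl min a, (pvHits rows cols).foldl max b) := by
  induction rows generalizing a b with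
  | nil => simp [pvHits]
  | cons r t ih =>
      have hinner : ∀ (lr : Int × Int),
          cols.foldl (fun (lr : Int × Int) x =>
            if PySem.List.pyGetD r x false then (min lr.1 x, max lr.2 x) else lr) lr
          = ((cols.filter (fun x => PySem.List.pyGetD r x false)).foldl min lr.1,
             (cols.filter (fun x => PySem.List.pyGetD r x false)).foldl max lr.2) := by
        intro lr
        rw [PySem.List.foldl_if_eq_foldl_filter]
        rw [PySem.List.foldl_prod_mk (f := fun a x => min a x) (g := fun a x => max a x)]
      simp only [List.foldl_cons, hinner, ih, pvHits, List.flatMap_cons, List.foldl_append]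

lemma pvMem_hits (rows : List (List Bool)) (cols : List Int) (x : Int) :
    x ∈ pvHits rows cols ↔ x ∈ cols ∧ pvColumnSet rows x = true := by
  simp [pvHits, pvColumnSet, List.mem_flatMap, List.mem_filter, List.any_eq_true]
  tauto

-- find? on an ascending list returns the least satisfying element
lemma pvFind_asc_min (p : Int → Bool) (l : List Int) (x y : Int)
    (hl : l.Pairwise (· < ·)) (h : l.find? p = some x) (hy : y ∈ l) (hp : p y) : x ≤ y := by
  induction l with
  | nil => simp at h
  | cons a t ih =>
      rw [List.find?_cons] at h
      rcases List.pairwise_cons.mp hl with ⟨ha, ht⟩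
      by_cases hpa : p a
      · simp [hpa] at h
        subst h
        rcases List.mem_cons.mp hy with rfl | hyt
        · exact le_refl _
        · exact le_of_lt (ha y hyt)
      · simp [hpa] at h
        rcases List.mem_cons.mp hy with rfl | hyt
        · exact absurd hp hpa
        · exact ih ht h hyt

lemma pvFind_desc_max (p : Int → Bool) (l : List Int) (x y : Int)
    (hl : l.Pairwise (· > ·)) (h : l.find? p = some x) (hy : y ∈ l) (hp : p y) : y ≤ x := by
  induction l with
  | nil => simp at h
  | cons a t ih =>
      rw [List.find?_cons] at h
      rcases List.pairwise_cons.mp hl with ⟨ha, ht⟩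
      by_cases hpa : p a
      · simp [hpa] at h
        subst h
        rcases List.mem_cons.mp hy with rfl | hyt
        · exact le_refl _
        · exact le_of_lt (ha y hyt)
      · simp [hpa] at h
        rcases List.mem_cons.mp hy with rfl | hyt
        · exact absurd hp hpa
        · exact ih ht h hyt

lemma pvRowClip_eq (row : List Bool) (l r : Int) (h0 : 0 ≤ l) (hlr : l ≤ r + 1)
    (hr : r + 1 ≤ (row.length : Int)) :
    (PySem.List.pyRange l (r + 1) 1).foldl
        (fun acc x => acc ++ [PySem.List.pyGetD row x false]) []
      = PySem.List.slice row (some l) (some (r + 1)) := by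
  rw [PySem.List.foldl_append_singleton_eq_map, List.nil_append,
      PySem.List.slice_of_nonneg row h0 (by omega) (by omega) hr]
  apply List.ext_getElem
  · simp [PySem.List.length_pyRange_one]
    omega
  · intro k hk1 hk2
    simp only [List.length_map, PySem.List.length_pyRange_one] at hk1
    simp only [List.getElem_map, PySem.List.getElem_pyRange_one]
    rw [PySem.List.pyGetD_eq_getElem row false (by omega) (by omega)]
    rw [List.getElem_take, List.getElem_drop]
    congr 1
    omega

theorem pvMain : ∀ (bitmap_2d : List (List Bool)) (width : Int) (height : Int),
    Pre_clip_bitmap_to_content_py bitmap_2d width height →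
    clip_bitmap_to_content_py bitmap_2d width height
      = clip_bitmap_to_content_py_alt bitmap_2d width height := by
  intro b w h hpre
  by_cases he : b = [] ∨ w = 0 ∨ h = 0
  · simp [clip_bitmap_to_content_py, clip_bitmap_to_content_py_alt, he]
  · rw [not_or, not_or] at he
    obtain ⟨hb, hw, hh⟩ := he
    by_cases hhneg : h < 0
    · -- height < 0: A's outer range empty → bounds (w,-1) → ([],1); B: rows = [] → none → ([],1)
      have hrange : PySem.List.pyRange 0 h 1 = [] := PySem.List.pyRange_one_eq_nil (by omega)
      have hrows : (if h > 0 then PySem.List.slice b none (some h) else []) = ([] : List (List Bool)) := by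
        simp [show ¬ h > 0 by omega]
      simp [clip_bitmap_to_content_py, clip_bitmap_to_content_py_alt,
            show ¬ (b = [] ∨ w = 0 ∨ h = 0) by tauto, hrange, hrows]
    · -- h > 0
      have hhpos : 0 < h := by omega
      by_cases hwneg : w < 0
      · -- width < 0: A's inner range empty; B finds nothing
        have hcols : PySem.List.pyRange 0 w 1 = [] := PySem.List.pyRange_one_eq_nil (by omega)
        have hne : ¬ (b.take h.toNat = []) := by
          rw [List.take_eq_nil_iff]
          rintro (h1 | h1)
          · omega
          · exact hb h1
        simp [clip_bitmap_to_content_py, clip_bitmap_to_content_py_alt,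
              show ¬ (b = [] ∨ w = 0 ∨ h = 0) by tauto, hcols,
              PySem.List.slice_to b hhpos.le, hne]
      · -- main case: w > 0, h > 0
        have hwpos : 0 < w := by omega
        have hok : h ≤ (b.length : Int) ∧ ∀ row ∈ b.take h.toNat, w ≤ (row.length : Int) := by
          rcases hpre with h1 | h1 | h1 | h1
          · omega
          · omega
          · exact absurd h1 hb
          · exact h1
        obtain ⟨hhlen, hrowlen⟩ := hok
        have hcond : ¬ (b = [] ∨ w = 0 ∨ h = 0) := by tauto
        have hne : ¬ (b.take h.toNat = []) := by
          rw [List.take_eq_nil_iff]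
          rintro (h1 | h1)
          · omega
          · exact hb h1
        have hrowsdef : (if h > 0 then PySem.List.slice b none (some h) else []) = b.take h.toNat := by
          rw [if_pos hhpos, PySem.List.slice_to b hhpos.le]
        have hlenrows : (b.take h.toNat).length = h.toNat := by
          simp
          omega
        have hcast : (((b.take h.toNat).length : Int)) = h := by rw [hlenrows]; omega
        have hget : ∀ y : Int, y ∈ PySem.List.pyRange 0 h 1 →
            PySem.List.pyGetD b y ([] : List Bool) = PySem.List.pyGetD (b.take h.toNat) y [] := by
          intro y hy
          rcases PySem.List.mem_pyRange_one.mp hy with ⟨hy0, hyh⟩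
          rw [PySem.List.pyGetD_eq_getElem b [] hy0 (by omega),
              PySem.List.pyGetD_eq_getElem (b.take h.toNat) [] hy0 (by rw [hcast]; omega),
              List.getElem_take]
        have hAbounds :
            (PySem.List.pyRange 0 h 1).foldl (fun (lr : Int × Int) y =>
              (PySem.List.pyRange 0 w 1).foldl (fun (lr : Int × Int) x =>
                if PySem.List.pyGetD (PySem.List.pyGetD b y []) x false then
                  (min lr.1 x, max lr.2 x)
                else lr) lr) (w, -1)
            = ((pvHits (b.take h.toNat) (PySem.List.pyRange 0 w 1)).foldl min w,
               (pvHits (b.take h.toNat) (PySem.List.pyRange 0 w 1)).foldl max (-1)) := by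
          rw [PySem.List.foldl_congr_mem _ _
              (fun (lr : Int × Int) y =>
                (PySem.List.pyRange 0 w 1).foldl (fun (lr : Int × Int) x =>
                  if PySem.List.pyGetD (PySem.List.pyGetD (b.take h.toNat) y []) x false then
                    (min lr.1 x, max lr.2 x)
                  else lr) lr) _
              (by intro acc y hy; rw [hget y hy])]
          have e2 := PySem.List.foldl_pyRange_zero_pyGetD' (b.take h.toNat) ([] : List Bool)
            (fun (lr : Int × Int) row =>
              (PySem.List.pyRange 0 w 1).foldl (fun (lr : Int × Int) x =>
                if PySem.List.pyGetD row x false then (min lr.1 x, max lr.2 x) else lr) lr)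
            (w, -1)
          rw [hcast] at e2
          rw [e2]
          exact pvBounds_eq _ _ _ _
        rcases hfind : (PySem.List.pyRange 0 w 1).find? (pvColumnSet (b.take h.toNat)) with _ | left
        · -- no set column: A's scan finds nothing
          have hHnil : pvHits (b.take h.toNat) (PySem.List.pyRange 0 w 1) = [] := by
            rw [List.eq_nil_iff_forall_not_mem]
            intro x hx
            rcases (pvMem_hits _ _ x).mp hx with ⟨hxc, hxs⟩
            exact (List.find?_eq_none.mp hfind x hxc) hxs
          simp only [clip_bitmap_to_content_py, clip_bitmap_to_content_py_alt, if_neg hcond,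
                     hrowsdef, hne, if_false, hfind, hAbounds, hHnil, List.foldl_nil]
          simp only [if_true]
          rw [PySem.List.foldl_append_singleton_eq_map (f := fun (_ : Int) => [false])]
          simp
        · -- a set column exists
          have hpleft : pvColumnSet (b.take h.toNat) left = true := List.find?_some hfind
          have hleftmem := PySem.List.mem_pyRange_one.mp (List.mem_of_find?_eq_some hfind)
          have hleftH : left ∈ pvHits (b.take h.toNat) (PySem.List.pyRange 0 w 1) :=
            (pvMem_hits _ _ _).mpr ⟨List.mem_of_find?_eq_some hfind, hpleft⟩
          have hfind2ne : (PySem.List.pyRange (w - 1) (-1) (-1)).find? (pvColumnSet (b.take h.toNat)) ≠ none := by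
            intro hnone
            exact (List.find?_eq_none.mp hnone left
              (PySem.List.mem_pyRange_neg_one.mpr ⟨by omega, by omega⟩)) hpleft
          obtain ⟨right, hfind2⟩ := Option.ne_none_iff_exists'.mp hfind2ne
          have hpright : pvColumnSet (b.take h.toNat) right = true := List.find?_some hfind2
          have hrightmem := PySem.List.mem_pyRange_neg_one.mp (List.mem_of_find?_eq_some hfind2)
          have hrightH : right ∈ pvHits (b.take h.toNat) (PySem.List.pyRange 0 w 1) :=
            (pvMem_hits _ _ _).mpr ⟨PySem.List.mem_pyRange_one.mpr ⟨by omega, by omega⟩, hpright⟩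
          have hpairdesc : (PySem.List.pyRange (w - 1) (-1) (-1)).Pairwise (· > ·) := by
            rw [PySem.List.pyRange_neg_one_eq_reverse]
            exact List.pairwise_reverse.mpr (PySem.List.pairwise_lt_pyRange_one _ _)
          set H := pvHits (b.take h.toNat) (PySem.List.pyRange 0 w 1) with hHdef
          have hmin_eq : H.foldl min w = left := by
            have h1 := (PySem.List.foldl_min_le H w).2 left hleftH
            rcases PySem.List.foldl_min_mem H w with h2 | h2
            · omega
            · rcases (pvMem_hits _ _ _).mp h2 with ⟨hc, hs⟩
              have := pvFind_asc_min _ _ _ _ (PySem.List.pairwise_lt_pyRange_one 0 w) hfind hc hs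
              omega
          have hmax_eq : H.foldl max (-1) = right := by
            have h1 := (PySem.List.le_foldl_max H (-1)).2 right hrightH
            rcases PySem.List.foldl_max_mem H (-1) with h2 | h2
            · omega
            · rcases (pvMem_hits _ _ _).mp h2 with ⟨hc, hs⟩
              have hcm := PySem.List.mem_pyRange_one.mp hc
              have := pvFind_desc_max _ _ _ _ hpairdesc hfind2
                (PySem.List.mem_pyRange_neg_one.mpr ⟨by omega, by omega⟩) hs
              omega
          have hlr : left ≤ right := by
            have := (PySem.List.le_foldl_max H (-1)).2 left hleftH
            omega
          have hAout : (PySem.List.pyRange 0 h 1).foldl (fun acc y =>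
                acc ++ [(PySem.List.pyRange left (right + 1) 1).foldl (fun row x =>
                  row ++ [PySem.List.pyGetD (PySem.List.pyGetD b y []) x false]) []]) []
              = (b.take h.toNat).map
                  (fun row => PySem.List.slice row (some left) (some (right + 1))) := by
            rw [PySem.List.foldl_append_singleton_eq_map
                (f := fun y => (PySem.List.pyRange left (right + 1) 1).foldl (fun row x =>
                  row ++ [PySem.List.pyGetD (PySem.List.pyGetD b y []) x false]) []),
                List.nil_append]
            rw [List.map_congr_left (g := fun y =>
                (PySem.List.pyRange left (right + 1) 1).foldl (fun row x =>
                  row ++ [PySem.List.pyGetD (PySem.List.pyGetD (b.take h.toNat) y []) x false]) [])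
                (by intro y hy; rw [hget y hy])]
            have hcomp : (fun y => (PySem.List.pyRange left (right + 1) 1).foldl (fun row x =>
                  row ++ [PySem.List.pyGetD (PySem.List.pyGetD (b.take h.toNat) y []) x false]) [])
                = (fun row => (PySem.List.pyRange left (right + 1) 1).foldl (fun row' x =>
                  row' ++ [PySem.List.pyGetD row x false]) []) ∘ (fun y => PySem.List.pyGetD (b.take h.toNat) y []) := rfl
            have e3 := PySem.List.map_pyGetD_pyRange_zero' (b.take h.toNat) ([] : List Bool)
            rw [hcast] at e3
            rw [hcomp, ← List.map_map, e3]
            apply List.map_congr_left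
            intro row hrow
            exact pvRowClip_eq row left right (by omega) (by omega)
              (by have := hrowlen row hrow; omega)
          simp only [clip_bitmap_to_content_py, clip_bitmap_to_content_py_alt, if_neg hcond,
                     hrowsdef, hne, if_false, hfind, hfind2, hAbounds, hmin_eq, hmax_eq]
          rw [if_neg (by omega)]
          rw [hAout]

-- ===== VERDICT (by name: the statement is the Claim_ definition above) =====
theorem clip_bitmap_to_content_py_spec : Claim_equal_clip_bitmap_to_content_py := by
  intro bitmap_2d width height _ hpre
  unfold Spec_clip_bitmap_to_content_py
  exact pvMain bitmap_2d width height hpre
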